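-- pv_equiv track=rewrite | github.com/laquabe/OneNet | COT_gen/filter.py | listwise_judge
-- ===== SOURCE A (Python) =====
-- def listwise_judge(llm_ans:str, candidates:list):
--     '''return el wiki_id'''
--     llm_ans = llm_ans.lower()
--     cand_id_dict = {'None':-1}
--     for cand in candidates:
--         cand_id_dict[cand['name']] = int(cand['wiki_id'])
--     pos_dict = {}
--     for name in cand_id_dict.keys():
--         pos_dict[name] = llm_ans.rfind(name.lower()) + len(name)
--     sort_list = sorted(pos_dict.items(), key = lambda kv:(kv[1], kv[0]), reverse=True)
--     return cand_id_dict[sort_list[0][0]]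
-- ===== SOURCE B (Python) =====
-- def listwise_judge(llm_ans: str, candidates: list):
--     '''return el wiki_id (single fused pass: running best by (score, name), no dicts, no sort)'''
--     ans = llm_ans.lower()
--     best_name = 'None'
--     best_score = ans.rfind('none') + 4
--     best_id = -1
--     for cand in candidates:
--         name = cand['name']
--         score = ans.rfind(name.lower()) + len(name)
--         if best_score < score or (score == best_score and best_name <= name):
--             best_name, best_score = name, score
--             best_id = int(cand['wiki_id'])
--     return best_id
-- ===== Notes on version B (the rewrite author's own statement) =====
-- stated objective: simpler
-- what changed: A builds an id dict, then a position dict over its keys, then reverse-sorts the (name, score) items and looks the head back up; B makes one fused pass over 'None' plus the candidates keeping a running best (name, score, id) by the (score, name) key, with no dicts and no sort.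
import Mathlib
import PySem

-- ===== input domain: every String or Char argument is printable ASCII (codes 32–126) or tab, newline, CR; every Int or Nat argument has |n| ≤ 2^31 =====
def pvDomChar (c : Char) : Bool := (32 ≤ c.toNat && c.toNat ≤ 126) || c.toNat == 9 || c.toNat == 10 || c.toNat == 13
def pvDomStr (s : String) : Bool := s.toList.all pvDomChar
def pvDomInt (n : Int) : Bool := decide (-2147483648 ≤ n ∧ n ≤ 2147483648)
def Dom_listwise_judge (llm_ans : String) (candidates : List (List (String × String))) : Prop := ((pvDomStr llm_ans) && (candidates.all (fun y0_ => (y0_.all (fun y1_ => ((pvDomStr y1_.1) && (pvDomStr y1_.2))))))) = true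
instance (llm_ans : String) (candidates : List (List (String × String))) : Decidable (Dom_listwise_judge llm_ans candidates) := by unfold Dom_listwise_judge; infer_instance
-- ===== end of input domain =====

-- B replaces A's three passes (id dict, position dict, reverse sort) by one fused pass keeping a running best by (score, name); equal cost class, simpler.

-- ===== PORT A =====
-- one iteration of A's first loop: cand_id_dict[cand['name']] = int(cand['wiki_id']); none = KeyError/ValueError
def pvStepA (d? : Option (PySem.Dict String Int)) (cand : List (String × String)) : Option (PySem.Dict String Int) :=
  d?.bind (fun d =>
    match PySem.Dict.get? (⟨cand⟩ : PySem.Dict String String) "name",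
          (PySem.Dict.get? (⟨cand⟩ : PySem.Dict String String) "wiki_id").bind PySem.Int.ofStr? with
    | some name, some id => some (d.insert name id)
    | _, _ => none)

def listwise_judge (llm_ans : String) (candidates : List (List (String × String))) : Int :=
  let llm := PySem.Str.lower llm_ans
  match candidates.foldl pvStepA (some ((PySem.Dict.empty : PySem.Dict String Int).insert "None" (-1))) with
  | none => 0  -- unreachable under Pre_: A raises KeyError/ValueError here
  | some cand_id_dict =>
    let pos_dict := cand_id_dict.keys.foldl
      (fun p name => p.insert name (PySem.Str.rfind llm (PySem.Str.lower name) + PySem.Str.len name))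
      (PySem.Dict.empty : PySem.Dict String Int)
    let sort_list := PySem.List.sorted2 pos_dict.items (fun kv => kv.2) (fun kv => kv.1) true
    match PySem.List.pyGet? sort_list 0 with
    | none => 0  -- unreachable: pos_dict always contains 'None'
    | some kv =>
      match PySem.Dict.get? cand_id_dict kv.1 with
      | some v => v
      | none => 0  -- unreachable: the winner is a key of cand_id_dict

-- ===== PORT B =====
-- one iteration of B's single loop: update the running best (name, score, id)
def pvStepB (ans : String) (st : String × Int × Int) (cand : List (String × String)) : String × Int × Int :=
  match PySem.Dict.get? (⟨cand⟩ : PySem.Dict String String) "name" with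
  | none => st  -- unreachable under Pre_: B raises KeyError here
  | some name =>
    let score := PySem.Str.rfind ans (PySem.Str.lower name) + PySem.Str.len name
    if st.2.1 < score ∨ (score = st.2.1 ∧ st.1 ≤ name) then
      match (PySem.Dict.get? (⟨cand⟩ : PySem.Dict String String) "wiki_id").bind PySem.Int.ofStr? with
      | some id => (name, score, id)
      | none => st  -- unreachable under Pre_: B raises ValueError here
    else st

def listwise_judge_alt (llm_ans : String) (candidates : List (List (String × String))) : Int :=
  let ans := PySem.Str.lower llm_ans
  (candidates.foldl (pvStepB ans) ("None", PySem.Str.rfind ans "none" + 4, (-1 : Int))).2.2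

-- ===== PRECONDITION & SPEC =====
-- Pre_ = exactly the inputs where A returns: every candidate dict has a 'name' key and a 'wiki_id' key whose value parses as int().
def Pre_listwise_judge (llm_ans : String) (candidates : List (List (String × String))) : Prop :=
  ∀ cand ∈ candidates,
    (PySem.Dict.get? (⟨cand⟩ : PySem.Dict String String) "name").isSome = true ∧
    ((PySem.Dict.get? (⟨cand⟩ : PySem.Dict String String) "wiki_id").bind PySem.Int.ofStr?).isSome = true
instance (llm_ans : String) (candidates : List (List (String × String))) : Decidable (Pre_listwise_judge llm_ans candidates) := by unfold Pre_listwise_judge; infer_instance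
def pvWitness_listwise_judge : String × (List (List (String × String))) :=
  ("i think it is Barack Obama", [[("name", "Barack Obama"), ("wiki_id", "123")], [("name", "Obama"), ("wiki_id", "7")]])

def Spec_listwise_judge (llm_ans : String) (candidates : List (List (String × String))) (out : Int) : Prop := out = listwise_judge_alt llm_ans candidates
instance (llm_ans : String) (candidates : List (List (String × String))) (out : Int) : Decidable (Spec_listwise_judge llm_ans candidates out) := by unfold Spec_listwise_judge; infer_instance

-- ===== CLAIM (what is proved, stated in full; the proofs are below) =====
def Claim_equal_listwise_judge : Prop := ∀ (llm_ans : String) (candidates : List (List (String × String))), Dom_listwise_judge llm_ans candidates → Pre_listwise_judge llm_ans candidates → Spec_listwise_judge llm_ans candidates (listwise_judge llm_ans candidates)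

-- ===== LEMMAS AND PROOFS =====

-- score of a candidate name in A's pos_dict / B's loop
def pvSc (llm n : String) : Int := PySem.Str.rfind llm (PySem.Str.lower n) + PySem.Str.len n
-- strict order on names by (score, name)
def pvNlt (llm : String) (a b : String) : Prop := pvSc llm a < pvSc llm b ∨ (pvSc llm a = pvSc llm b ∧ a < b)
-- the comparison sorted2 … true uses: 'x comes before h' ⇔ h's key is lex-smaller than x's
def pvBefore (x h : String × Int) : Bool := (decide (h.2 < x.2) || (!decide (x.2 < h.2) && decide (h.1 < x.1)))
-- strict lex order on (name, score) pairs matching pvBefore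
def pvPlt (y m : String × Int) : Prop := y.2 < m.2 ∨ (y.2 = m.2 ∧ y.1 < m.1)
-- invariant tying A's dict to B's running best
def pvInv (llm : String) (d : PySem.Dict String Int) (st : String × Int × Int) : Prop :=
  d.keys.Nodup ∧ st.1 ∈ d.keys ∧ st.2.1 = pvSc llm st.1 ∧ d.getD st.1 0 = st.2.2 ∧
    ∀ n ∈ d.keys, n = st.1 ∨ pvNlt llm n st.1

theorem pvBefore_iff (x h : String × Int) : pvBefore x h = true ↔ pvPlt h x := by
  simp only [pvBefore, pvPlt, Bool.or_eq_true, Bool.and_eq_true, Bool.not_eq_true',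
    decide_eq_true_eq, decide_eq_false_iff_not]
  constructor
  · rintro (h1 | ⟨h1, h2⟩)
    · exact Or.inl h1
    · rcases lt_trichotomy h.2 x.2 with h3 | h3 | h3
      · exact Or.inl h3
      · exact Or.inr ⟨h3, h2⟩
      · exact absurd h3 h1
  · rintro (h1 | ⟨h1, h2⟩)
    · exact Or.inl h1
    · exact Or.inr ⟨by omega, h2⟩

theorem pvNlt_trans (llm : String) {a b c : String} (h1 : pvNlt llm a b) (h2 : pvNlt llm b c) : pvNlt llm a c := by
  rcases h1 with h1 | ⟨h1, h1'⟩ <;> rcases h2 with h2 | ⟨h2, h2'⟩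
  · exact Or.inl (lt_trans h1 h2)
  · exact Or.inl (by omega)
  · exact Or.inl (by omega)
  · exact Or.inr ⟨by omega, lt_trans h1' h2'⟩

theorem pv_head_insertBy (before : (String × Int) → (String × Int) → Bool) (x : String × Int) (l : List (String × Int)) :
    (PySem.List.insertBy before x l).head? =
      some (match l with | [] => x | y :: _ => if before x y then x else y) := by
  cases l with
  | nil => rfl
  | cons y ys =>
    simp only [PySem.List.insertBy]
    split <;> rfl

-- the head of the insertion sort is the running best of the comparison
theorem pv_foldl_insertBy_head (before : (String × Int) → (String × Int) → Bool) :
    ∀ (xs acc : List (String × Int)),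
      (xs.foldl (fun a x => PySem.List.insertBy before x a) acc).head? =
        xs.foldl (fun (b : Option (String × Int)) x =>
          some (match b with | none => x | some h => if before x h then x else h)) acc.head? := by
  intro xs
  induction xs with
  | nil => intro acc; rfl
  | cons x t ih =>
    intro acc
    simp only [List.foldl_cons]
    rw [ih, pv_head_insertBy]
    cases acc <;> rfl

-- the running best settles on the unique maximum m
theorem pv_best_eq (m : String × Int) :
    ∀ (xs : List (String × Int)) (b : Option (String × Int)),
      (∀ y ∈ xs, y = m ∨ pvPlt y m) →
      (b = some m ∨ (m ∈ xs ∧ (b = none ∨ ∃ hb, b = some hb ∧ pvPlt hb m))) →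
      xs.foldl (fun (b : Option (String × Int)) x =>
          some (match b with | none => x | some h => if pvBefore x h then x else h)) b = some m := by
  intro xs
  induction xs with
  | nil =>
    intro b _ hb
    rcases hb with rfl | ⟨hm, _⟩
    · rfl
    · exact absurd hm (List.not_mem_nil)
  | cons x t ih =>
    intro b hall hb
    have hx := hall x List.mem_cons_self
    have hall' : ∀ y ∈ t, y = m ∨ pvPlt y m := fun y hy => hall y (List.mem_cons_of_mem _ hy)
    simp only [List.foldl_cons]
    rcases hb with rfl | ⟨hm, hbo⟩
    · -- accumulator already m; it never changes
      apply ih _ hall'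
      left
      rcases hx with rfl | hx
      · have : pvBefore x x = false := by
          by_contra h
          simp only [Bool.not_eq_false] at h
          rcases (pvBefore_iff x x).mp h with h1 | ⟨_, h1⟩ <;> exact absurd h1 (lt_irrefl _)
        simp [this]
      · have : pvBefore x m = false := by
          by_contra h
          simp only [Bool.not_eq_false] at h
          have h2 := (pvBefore_iff x m).mp h
          rcases hx with h1 | ⟨h1, h1'⟩ <;> rcases h2 with h2 | ⟨h2, h2'⟩
          · exact absurd (lt_trans h1 h2) (lt_irrefl _)
          · omega
          · omega
          · exact absurd (lt_trans h1' h2') (lt_irrefl _)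
        simp [this]
    · -- m not yet reached
      rcases List.mem_cons.mp hm with rfl | hmt
      · -- x = m: the accumulator becomes m
        apply ih _ hall'
        left
        rcases hbo with rfl | ⟨hb', rfl, hlt⟩
        · rfl
        · have hbt := (pvBefore_iff _ hb').mpr hlt
          simp [hbt]
      · -- x ≠ m yet: either way the accumulator stays none-or-below-m
        apply ih _ hall'
        rcases hbo with rfl | ⟨hb', rfl, hlt⟩
        · rcases hx with rfl | hxlt
          · left; rfl
          · right
            exact ⟨hmt, Or.inr ⟨x, rfl, hxlt⟩⟩
        · rcases hx with rfl | hxlt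
          · left
            have hbt := (pvBefore_iff _ hb').mpr hlt
            simp [hbt]
          · right
            refine ⟨hmt, Or.inr ?_⟩
            by_cases h : pvBefore x hb' = true
            · exact ⟨x, by simp [h], hxlt⟩
            · exact ⟨hb', by simp [h], hlt⟩

-- A's second loop: inserting fresh keys appends the items in order
theorem pv_pos_items (f : String → Int) :
    ∀ (ks : List String) (p : PySem.Dict String Int),
      ks.Nodup → (∀ n ∈ ks, p.contains n = false) →
      (ks.foldl (fun p name => p.insert name (f name)) p).items = p.items ++ ks.map (fun n => (n, f n)) := by
  intro ks
  induction ks with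
  | nil => intro p _ _; simp
  | cons k t ih =>
    intro p hnd hdisj
    simp only [List.foldl_cons, List.map_cons]
    rw [ih _ (List.nodup_cons.mp hnd).2]
    · rw [PySem.Dict.items_insert_of_not_contains _ _ (hdisj k List.mem_cons_self)]
      simp
    · intro n hn
      rw [PySem.Dict.contains_insert]
      have hne : n ≠ k := fun h => (List.nodup_cons.mp hnd).1 (h ▸ hn)
      simp [hne, hdisj n (List.mem_cons_of_mem _ hn)]

-- the joint induction: A's dict fold succeeds and B's running best tracks it
theorem pv_joint (llm : String) :
    ∀ (cs : List (List (String × String))) (d : PySem.Dict String Int) (st : String × Int × Int),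
      pvInv llm d st →
      (∀ cand ∈ cs,
        (PySem.Dict.get? (⟨cand⟩ : PySem.Dict String String) "name").isSome = true ∧
        ((PySem.Dict.get? (⟨cand⟩ : PySem.Dict String String) "wiki_id").bind PySem.Int.ofStr?).isSome = true) →
      ∃ d', cs.foldl pvStepA (some d) = some d' ∧ pvInv llm d' (cs.foldl (pvStepB llm) st) := by
  intro cs
  induction cs with
  | nil => intro d st hI _; exact ⟨d, rfl, hI⟩
  | cons cand t ih =>
    intro d st hI hpre
    obtain ⟨hname, hid⟩ := hpre cand List.mem_cons_self
    obtain ⟨name, hn⟩ := Option.isSome_iff_exists.mp hname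
    obtain ⟨id, hi⟩ := Option.isSome_iff_exists.mp hid
    obtain ⟨hnd, hmem, hsc, hgd, hmax⟩ := hI
    simp only [List.foldl_cons, pvStepA, pvStepB, hn, hi, Option.bind_some]
    set s := PySem.Str.rfind llm (PySem.Str.lower name) + PySem.Str.len name with hs
    have hscn : s = pvSc llm name := rfl
    by_cases hC : st.2.1 < s ∨ (s = st.2.1 ∧ st.1 ≤ name)
    · -- B updates; the new best is name with A's freshly stored id
      simp only [if_pos hC]
      apply ih (d.insert name id) (name, s, id)
      · refine ⟨PySem.Dict.nodup_keys_insert d name id hnd, ?_, hscn, ?_, ?_⟩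
        · exact (PySem.Dict.mem_keys_insert d name name id).mpr (Or.inl rfl)
        · exact PySem.Dict.getD_insert_self d name id 0
        · intro n hnk
          rcases (PySem.Dict.mem_keys_insert d name n id).mp hnk with rfl | hnk'
          · exact Or.inl rfl
          · have hbn : st.1 = name ∨ pvNlt llm st.1 name := by
              by_cases he : st.1 = name
              · exact Or.inl he
              · right
                rcases hC with h | ⟨h, h'⟩
                · exact Or.inl (by omega)
                · exact Or.inr ⟨by omega, lt_of_le_of_ne h' he⟩
            rcases hmax n hnk' with rfl | hlt
            · rcases hbn with h | h
              · exact Or.inl h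
              · exact Or.inr h
            · rcases hbn with rfl | h
              · exact Or.inr hlt
              · exact Or.inr (pvNlt_trans llm hlt h)
      · exact fun c hc => hpre c (List.mem_cons_of_mem _ hc)
    · -- B keeps its best; name is strictly below it
      simp only [if_neg hC]
      apply ih (d.insert name id) st
      · have hnlt : pvNlt llm name st.1 := by
          obtain ⟨h1, h2⟩ := not_or.mp hC
          rw [not_and_or] at h2
          rcases lt_trichotomy (pvSc llm name) (pvSc llm st.1) with h | h | h
          · exact Or.inl h
          · refine Or.inr ⟨h, ?_⟩
            rcases h2 with h2 | h2
            · exact absurd (by omega) h2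
            · exact not_le.mp h2
          · exact absurd (show st.2.1 < s by omega) h1
        have hne : name ≠ st.1 := by
          rintro rfl
          rcases hnlt with h | ⟨_, h⟩ <;> exact absurd h (lt_irrefl _)
        refine ⟨PySem.Dict.nodup_keys_insert d name id hnd, ?_, hsc, ?_, ?_⟩
        · exact (PySem.Dict.mem_keys_insert d name st.1 id).mpr (Or.inr hmem)
        · rw [PySem.Dict.getD_insert]
          simp only [if_neg (fun h : st.1 = name => hne h.symm)]
          exact hgd
        · intro n hnk
          rcases (PySem.Dict.mem_keys_insert d name n id).mp hnk with rfl | hnk'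
          · exact Or.inr hnlt
          · exact hmax n hnk'
      · exact fun c hc => hpre c (List.mem_cons_of_mem _ hc)

-- ===== VERDICT (by name: the statement is the Claim_ definition above) =====
theorem listwise_judge_spec : Claim_equal_listwise_judge := by
  intro llm_ans candidates _ hpre
  unfold Spec_listwise_judge listwise_judge listwise_judge_alt
  set llm := PySem.Str.lower llm_ans with hllm
  -- initial invariant
  have hinit : pvInv llm ((PySem.Dict.empty : PySem.Dict String Int).insert "None" (-1))
      ("None", PySem.Str.rfind llm "none" + 4, (-1 : Int)) := by
    refine ⟨by decide, by show "None" ∈ ((PySem.Dict.empty : PySem.Dict String Int).insert "None" (-1)).keys; decide, ?_, by show ((PySem.Dict.empty : PySem.Dict String Int).insert "None" (-1)).getD "None" 0 = -1; decide, ?_⟩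
    · show PySem.Str.rfind llm "none" + 4 = pvSc llm "None"
      have h1 : PySem.Str.lower "None" = "none" := by decide
      have h2 : PySem.Str.len "None" = 4 := by decide
      rw [pvSc, h1, h2]
    · intro n hn
      have : n = "None" := by
        have : ((PySem.Dict.empty : PySem.Dict String Int).insert "None" (-1)).keys = ["None"] := by decide
        rw [this] at hn
        simpa using hn
      exact Or.inl this
  obtain ⟨d', hfoldA, hnd, hmem, hsc, hgd, hmax⟩ := pv_joint llm candidates _ _ hinit hpre
  rw [hfoldA]
  set st := candidates.foldl (pvStepB llm) ("None", PySem.Str.rfind llm "none" + 4, (-1 : Int)) with hst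
  -- pos_dict items are the keys paired with their scores
  have hitems : (d'.keys.foldl (fun p name => p.insert name (PySem.Str.rfind llm (PySem.Str.lower name) + PySem.Str.len name))
      (PySem.Dict.empty : PySem.Dict String Int)).items
      = d'.keys.map (fun n => (n, pvSc llm n)) := by
    have := pv_pos_items (fun n => pvSc llm n) d'.keys (PySem.Dict.empty : PySem.Dict String Int) hnd
      (fun n _ => rfl)
    simpa [pvSc] using this
  -- the winner of A's reverse sort is B's final best name
  have hsort : PySem.List.sorted2 ((d'.keys.foldl (fun p name => p.insert name (PySem.Str.rfind llm (PySem.Str.lower name) + PySem.Str.len name)) (PySem.Dict.empty : PySem.Dict String Int)).items) (fun kv => kv.2) (fun kv => kv.1) true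
      = ((d'.keys.foldl (fun p name => p.insert name (PySem.Str.rfind llm (PySem.Str.lower name) + PySem.Str.len name)) (PySem.Dict.empty : PySem.Dict String Int)).items).foldl (fun acc x => PySem.List.insertBy pvBefore x acc) [] := rfl
  have hhead : (((d'.keys.foldl (fun p name => p.insert name (PySem.Str.rfind llm (PySem.Str.lower name) + PySem.Str.len name)) (PySem.Dict.empty : PySem.Dict String Int)).items).foldl (fun acc x => PySem.List.insertBy pvBefore x acc) []).head? = some (st.1, pvSc llm st.1) := by
    rw [pv_foldl_insertBy_head]
    apply pv_best_eq
    · intro y hy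
      rw [hitems] at hy
      obtain ⟨n, hn, rfl⟩ := List.mem_map.mp hy
      rcases hmax n hn with rfl | hlt
      · exact Or.inl rfl
      · right
        rcases hlt with h | ⟨h, h'⟩
        · exact Or.inl h
        · exact Or.inr ⟨h, h'⟩
    · right
      constructor
      · rw [hitems]
        exact List.mem_map.mpr ⟨st.1, hmem, rfl⟩
      · exact Or.inl rfl
  have hget : PySem.List.pyGet? (((d'.keys.foldl (fun p name => p.insert name (PySem.Str.rfind llm (PySem.Str.lower name) + PySem.Str.len name)) (PySem.Dict.empty : PySem.Dict String Int)).items).foldl (fun acc x => PySem.List.insertBy pvBefore x acc) []) 0 = some (st.1, pvSc llm st.1) := by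
    rw [PySem.List.pyGet?_zero, ← List.head?_eq_getElem?]
    exact hhead
  simp only [hsort, hget]
  -- look the winner up in cand_id_dict
  have hcont : d'.contains st.1 = true := (PySem.Dict.contains_iff_mem_keys d' st.1).mpr hmem
  have hsome : (d'.get? st.1).isSome = true := by
    rw [Option.isSome_iff_ne_none]
    intro h
    rw [PySem.Dict.get?_eq_none_iff_contains] at h
    simp [hcont] at h
  obtain ⟨v, hv⟩ := Option.isSome_iff_exists.mp hsome
  have : v = st.2.2 := by
    have := PySem.Dict.getD_eq_get?_getD d' st.1 (0 : Int)
    rw [hv] at this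
    simp only [Option.getD_some] at this
    omega
  rw [hv]
  exact this
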